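-- pv_equiv track=rewrite | github.com/734ai/MicroGolf | microgolf/model/tokenizer.py | _detect_grid_patterns
-- ===== SOURCE A (Python) =====
-- from typing import List, Dict, Tuple, Any, Optional
--
-- def _detect_grid_patterns(grid: List[List[int]]) -> List[Tuple[int, List[int]]]:
--     """Detect specific patterns in grid"""
--     patterns = []
--     h, w = len(grid), len(grid[0])
--
--     # Pattern types (encoded as indices)
--     HORIZONTAL_REPEAT = 1
--     VERTICAL_REPEAT = 2
--     DIAGONAL_SYMMETRY = 3
--     ROTATIONAL_SYMMETRY = 4
--
--     # Check horizontal repetition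
--     for period in [2, 3, 4]:
--         if w % period == 0:
--             is_repeat = all(
--                 grid[i][j] == grid[i][j % period]
--                 for i in range(h) for j in range(w)
--             )
--             if is_repeat:
--                 patterns.append((HORIZONTAL_REPEAT, [period, h, w]))
--                 break
--
--     # Check vertical repetition
--     for period in [2, 3, 4]:
--         if h % period == 0:
--             is_repeat = all(
--                 grid[i][j] == grid[i % period][j]
--                 for i in range(h) for j in range(w)
--             )
--             if is_repeat:
--                 patterns.append((VERTICAL_REPEAT, [period, h, w]))
--                 break
--
--     # Check symmetries (if square grid)
--     if h == w:
--         # Diagonal symmetry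
--         is_diag_sym = all(
--             grid[i][j] == grid[j][i]
--             for i in range(h) for j in range(w)
--         )
--         if is_diag_sym:
--             patterns.append((DIAGONAL_SYMMETRY, [h, w, 0]))
--
--         # 180-degree rotational symmetry
--         is_rot_sym = all(
--             grid[i][j] == grid[h-1-i][w-1-j]
--             for i in range(h) for j in range(w)
--         )
--         if is_rot_sym:
--             patterns.append((ROTATIONAL_SYMMETRY, [h, w, 180]))
--
--     return patterns
-- ===== SOURCE B (Python) =====
-- from typing import List, Tuple
--
-- def _detect_grid_patterns(grid: List[List[int]]) -> List[Tuple[int, List[int]]]: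
--     """Detect grid patterns by a single fused elimination pass: start with every
--     candidate hypothesis (divisor periods per axis, the two symmetries if square)
--     and kill hypotheses cell by cell; the smallest surviving period wins."""
--     h, w = len(grid), len(grid[0])
--     alive_h = [p for p in (2, 3, 4) if w % p == 0]
--     alive_v = [p for p in (2, 3, 4) if h % p == 0]
--     diag = rot = (h == w)
--
--     if alive_h or alive_v or diag:
--         for i in range(h):
--             for j in range(w):
--                 v = grid[i][j]
--                 # horizontal period p survives iff every cell equals its right-shift by p
--                 alive_h = [p for p in alive_h if j + p >= w or v == grid[i][j + p]]
--                 # vertical period p survives iff every cell equals its down-shift by p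
--                 alive_v = [p for p in alive_v if i + p >= h or v == grid[i + p][j]]
--                 if diag and v != grid[j][i]:
--                     diag = False
--                 if rot and v != grid[h - 1 - i][w - 1 - j]:
--                     rot = False
--
--     patterns = []
--     if alive_h:
--         patterns.append((1, [alive_h[0], h, w]))
--     if alive_v:
--         patterns.append((2, [alive_v[0], h, w]))
--     if diag:
--         patterns.append((3, [h, w, 0]))
--     if rot:
--         patterns.append((4, [h, w, 180]))
--     return patterns
-- ===== Notes on version B (the rewrite author's own statement) =====
-- stated objective: alternative
-- what changed: A runs four independent full-grid scans (per-period with break, anchored at j%period/i%period); B makes one fused elimination pass over the cells, maintaining a set of surviving hypotheses (divisor periods per axis plus the two symmetries) killed cell by cell, using the shift characterization grid[i][j]==grid[i][j+p] instead of the modular anchor, and finally emits the smallest surviving period per axis.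
-- outside the precondition, e.g. on _detect_grid_patterns([]): A raises IndexError, B raises IndexError; on _detect_grid_patterns([[1, 2, 9, 9, 9, 9], [1], [1], [1], [1]]): A returns [], B raises IndexError
import Mathlib
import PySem

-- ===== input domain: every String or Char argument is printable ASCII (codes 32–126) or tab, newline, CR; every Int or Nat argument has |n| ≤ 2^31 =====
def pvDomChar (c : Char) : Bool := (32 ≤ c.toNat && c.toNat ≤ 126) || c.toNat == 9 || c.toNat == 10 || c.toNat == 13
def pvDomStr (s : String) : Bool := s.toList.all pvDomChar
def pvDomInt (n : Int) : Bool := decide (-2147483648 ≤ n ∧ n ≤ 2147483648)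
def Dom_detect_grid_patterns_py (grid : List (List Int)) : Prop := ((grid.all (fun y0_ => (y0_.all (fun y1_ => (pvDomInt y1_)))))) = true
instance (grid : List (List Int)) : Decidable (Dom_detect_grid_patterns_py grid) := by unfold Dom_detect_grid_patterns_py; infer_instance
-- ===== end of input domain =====

-- B replaces A's four independent full-grid scans (per-period, modular anchor, break) by one
-- fused elimination pass over the cells that maintains the set of surviving hypotheses
-- (divisor periods per axis, the two symmetries), kills them cell by cell via the shift
-- relation grid[i][j] == grid[i][j+p], and emits the smallest surviving period; alternative
-- decomposition, same asymptotic cost.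

-- ===== PORT A =====
-- pvCell i j transliterates grid[i][j]; on inputs admitted by Pre_ every access is in bounds.
def pvCell (grid : List (List Int)) (i j : Nat) : Int := (grid.getD i []).getD j 0

def detect_grid_patterns_py (grid : List (List Int)) : List (Int × List Int) :=
  let h := grid.length
  let w := grid.headI.length        -- len(grid[0]); Pre_ excludes the empty grid (IndexError)
  let allc : (Nat → Nat → Bool) → Bool := fun f =>
    (List.range h).all (fun i => (List.range w).all (fun j => f i j))
  -- for period in [2,3,4]: … break  ⇒ first period passing its test
  let hor := ([2, 3, 4] : List Nat).find? (fun p =>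
      w % p == 0 && allc (fun i j => pvCell grid i j == pvCell grid i (j % p)))
  let ver := ([2, 3, 4] : List Nat).find? (fun p =>
      h % p == 0 && allc (fun i j => pvCell grid i j == pvCell grid (i % p) j))
  let base : List (Int × List Int) :=
    (match hor with | some p => [(1, [(p : Int), (h : Int), (w : Int)])] | none => []) ++
    (match ver with | some p => [(2, [(p : Int), (h : Int), (w : Int)])] | none => [])
  if h = w then
    base ++
    (if allc (fun i j => pvCell grid i j == pvCell grid j i) then [(3, [(h : Int), (w : Int), 0])] else []) ++
    -- h-1-i, w-1-j are Python's nonnegative subtractions here (i < h, j < w), so Nat `-` is exact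
    (if allc (fun i j => pvCell grid i j == pvCell grid (h - 1 - i) (w - 1 - j)) then [(4, [(h : Int), (w : Int), 180])] else [])
  else base

-- ===== PORT B =====
-- the body of B's inner loop: one cell (i, j) updates the state
-- (alive_h, alive_v, diag, rot) exactly as Source B's loop body does
def pvStepB (grid : List (List Int)) (h w i : Nat)
    (s : List Nat × List Nat × Bool × Bool) (j : Nat) : List Nat × List Nat × Bool × Bool :=
  let v := pvCell grid i j
  (s.1.filter (fun p => decide (w ≤ j + p) || v == pvCell grid i (j + p)),
   s.2.1.filter (fun p => decide (h ≤ i + p) || v == pvCell grid (i + p) j),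
   s.2.2.1 && (v == pvCell grid j i),
   s.2.2.2 && (v == pvCell grid (h - 1 - i) (w - 1 - j)))

def detect_grid_patterns_py_alt (grid : List (List Int)) : List (Int × List Int) :=
  let h := grid.length
  let w := grid.headI.length
  let aliveH0 := ([2, 3, 4] : List Nat).filter (fun p => w % p == 0)
  let aliveV0 := ([2, 3, 4] : List Nat).filter (fun p => h % p == 0)
  let dr0 : Bool := h == w
  let st0 : List Nat × List Nat × Bool × Bool := (aliveH0, aliveV0, dr0, dr0)
  let st := if aliveH0 ≠ [] ∨ aliveV0 ≠ [] ∨ dr0 = true then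
      (List.range h).foldl (fun s i => (List.range w).foldl (pvStepB grid h w i) s) st0
    else st0
  (match st.1.head? with | some p => [((1 : Int), [(p : Int), (h : Int), (w : Int)])] | none => []) ++
  (match st.2.1.head? with | some p => [((2 : Int), [(p : Int), (h : Int), (w : Int)])] | none => []) ++
  (if st.2.2.1 then [((3 : Int), [(h : Int), (w : Int), 0])] else []) ++
  (if st.2.2.2 then [((4 : Int), [(h : Int), (w : Int), 180])] else [])

-- ===== PRECONDITION & SPEC =====
-- Pre_ excludes the empty grid (len(grid[0]) raises IndexError) and grids with a row shorter
-- than the first row, on which the scans index past that row and generally raise IndexError;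
-- short-row grids on which no check applies (no period divides w or h, not square), where
-- neither program touches a cell and both return [], stay inside.
def Pre_detect_grid_patterns_py (grid : List (List Int)) : Prop :=
  grid ≠ [] ∧
    ((∀ row ∈ grid, grid.headI.length ≤ row.length) ∨
      (grid.headI.length % 2 ≠ 0 ∧ grid.headI.length % 3 ≠ 0 ∧ grid.headI.length % 4 ≠ 0 ∧
        grid.length % 2 ≠ 0 ∧ grid.length % 3 ≠ 0 ∧ grid.length % 4 ≠ 0 ∧
        grid.length ≠ grid.headI.length))
instance (grid : List (List Int)) : Decidable (Pre_detect_grid_patterns_py grid) := by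
  unfold Pre_detect_grid_patterns_py; infer_instance

def pvWitness_detect_grid_patterns_py : List (List Int) := [[1, 2], [2, 1]]

def Spec_detect_grid_patterns_py (grid : List (List Int)) (out : List (Int × List Int)) : Prop := out = detect_grid_patterns_py_alt grid
instance (grid : List (List Int)) (out : List (Int × List Int)) : Decidable (Spec_detect_grid_patterns_py grid out) := by unfold Spec_detect_grid_patterns_py; infer_instance

-- ===== CLAIM (what is proved, stated in full; the proofs are below) =====
def Claim_equal_detect_grid_patterns_py : Prop := ∀ (grid : List (List Int)), Dom_detect_grid_patterns_py grid → Pre_detect_grid_patterns_py grid → Spec_detect_grid_patterns_py grid (detect_grid_patterns_py grid)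

-- ===== LEMMAS AND PROOFS =====

-- the inner loop of B (one row) filters each survivor list by 'relation holds at every
-- visited cell' and ANDs the two symmetry flags with the same conjunction
lemma inner_fold (grid : List (List Int)) (h w i : Nat) (L : List Nat)
    (s : List Nat × List Nat × Bool × Bool) :
    L.foldl (pvStepB grid h w i) s =
      (s.1.filter (fun p => L.all (fun j => decide (w ≤ j + p) || pvCell grid i j == pvCell grid i (j + p))),
       s.2.1.filter (fun p => L.all (fun j => decide (h ≤ i + p) || pvCell grid i j == pvCell grid (i + p) j)),
       s.2.2.1 && L.all (fun j => pvCell grid i j == pvCell grid j i),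
       s.2.2.2 && L.all (fun j => pvCell grid i j == pvCell grid (h - 1 - i) (w - 1 - j))) := by
  induction L generalizing s with
  | nil => simp
  | cons j L ih =>
    rw [List.foldl_cons, ih]
    simp only [pvStepB, List.filter_filter, List.all_cons, Bool.and_assoc]
    apply congrArg₂ Prod.mk (List.filter_congr (fun p _ => Bool.and_comm _ _))
    apply congrArg₂ Prod.mk (List.filter_congr (fun p _ => Bool.and_comm _ _))
    rfl

-- the outer loop composes the row effects
lemma outer_fold (grid : List (List Int)) (h w : Nat) (M : List Nat)
    (s : List Nat × List Nat × Bool × Bool) :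
    M.foldl (fun s i => (List.range w).foldl (pvStepB grid h w i) s) s =
      (s.1.filter (fun p => M.all (fun i => (List.range w).all (fun j => decide (w ≤ j + p) || pvCell grid i j == pvCell grid i (j + p)))),
       s.2.1.filter (fun p => M.all (fun i => (List.range w).all (fun j => decide (h ≤ i + p) || pvCell grid i j == pvCell grid (i + p) j))),
       s.2.2.1 && M.all (fun i => (List.range w).all (fun j => pvCell grid i j == pvCell grid j i)),
       s.2.2.2 && M.all (fun i => (List.range w).all (fun j => pvCell grid i j == pvCell grid (h - 1 - i) (w - 1 - j)))) := by
  induction M generalizing s with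
  | nil => simp
  | cons i M ih =>
    rw [List.foldl_cons, ih, inner_fold]
    simp only [List.filter_filter, List.all_cons, Bool.and_assoc]
    apply congrArg₂ Prod.mk (List.filter_congr (fun p _ => Bool.and_comm _ _))
    apply congrArg₂ Prod.mk (List.filter_congr (fun p _ => Bool.and_comm _ _))
    rfl

-- shift-periodicity (a j = a (j+p) whenever both indices are in range) is the same as
-- A's anchored periodicity (a j = a (j % p))
lemma shift_iff_mod (a : Nat → Int) (w p : Nat) (hp : 0 < p) :
    (∀ j, j + p < w → a j = a (j + p)) ↔ (∀ j, j < w → a j = a (j % p)) := by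
  constructor
  · intro hshift j
    induction j using Nat.strong_induction_on with
    | _ j ih =>
      intro hj
      by_cases hlt : j < p
      · rw [Nat.mod_eq_of_lt hlt]
      · have hp' : p ≤ j := le_of_not_gt hlt
        have h1 : a (j - p) = a j := by
          have := hshift (j - p) (by omega)
          rwa [Nat.sub_add_cancel hp'] at this
        rw [← h1, ih (j - p) (by omega) (by omega), Nat.mod_eq_sub_mod hp']
  · intro hmod j hj
    rw [hmod j (by omega), hmod (j + p) hj, Nat.add_mod_right]

-- per axis, A's whole-grid modular test equals B's whole-grid shift test
lemma hor_bool (grid : List (List Int)) (p : Nat) (hp : 0 < p) :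
    ((List.range grid.length).all (fun i => (List.range grid.headI.length).all (fun j =>
        pvCell grid i j == pvCell grid i (j % p)))) =
    ((List.range grid.length).all (fun i => (List.range grid.headI.length).all (fun j =>
        decide (grid.headI.length ≤ j + p) || pvCell grid i j == pvCell grid i (j + p)))) := by
  rw [Bool.eq_iff_iff]
  simp only [List.all_eq_true, List.mem_range, beq_iff_eq, Bool.or_eq_true, decide_eq_true_eq]
  constructor
  · intro H i hi j hj
    by_cases hc : grid.headI.length ≤ j + p
    · exact Or.inl hc
    · exact Or.inr ((shift_iff_mod (pvCell grid i) grid.headI.length p hp).mpr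
        (fun j' hj' => H i hi j' hj') j (by omega))
  · intro H i hi j hj
    exact (shift_iff_mod (pvCell grid i) grid.headI.length p hp).mp
      (fun j' hj' => (H i hi j' (by omega)).resolve_left (by omega)) j hj

lemma ver_bool (grid : List (List Int)) (p : Nat) (hp : 0 < p) :
    ((List.range grid.length).all (fun i => (List.range grid.headI.length).all (fun j =>
        pvCell grid i j == pvCell grid (i % p) j))) =
    ((List.range grid.length).all (fun i => (List.range grid.headI.length).all (fun j =>
        decide (grid.length ≤ i + p) || pvCell grid i j == pvCell grid (i + p) j))) := by
  rw [Bool.eq_iff_iff]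
  simp only [List.all_eq_true, List.mem_range, beq_iff_eq, Bool.or_eq_true, decide_eq_true_eq]
  constructor
  · intro H i hi j hj
    by_cases hc : grid.length ≤ i + p
    · exact Or.inl hc
    · exact Or.inr ((shift_iff_mod (fun i' => pvCell grid i' j) grid.length p hp).mpr
        (fun i' hi' => H i' hi' j hj) i (by omega))
  · intro H i hi j hj
    exact (shift_iff_mod (fun i' => pvCell grid i' j) grid.length p hp).mp
      (fun i' hi' => (H i' (by omega) j hj).resolve_left (by omega)) i hi

lemma find?_congr' {α : Type} (l : List α) (p q : α → Bool) (h : ∀ a ∈ l, p a = q a) :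
    l.find? p = l.find? q := by
  induction l with
  | nil => rfl
  | cons a t ih =>
    have ha := h a (List.mem_cons_self ..)
    rw [List.find?_cons, List.find?_cons, ha]
    cases q a with
    | true => rfl
    | false => exact ih (fun b hb => h b (List.mem_cons_of_mem _ hb))

lemma ports_eq (grid : List (List Int)) :
    detect_grid_patterns_py grid = detect_grid_patterns_py_alt grid := by
  simp only [detect_grid_patterns_py, detect_grid_patterns_py_alt]
  have e1 : ((([2, 3, 4] : List Nat).filter (fun p => grid.headI.length % p == 0)).filter
        (fun p => (List.range grid.length).all (fun i => (List.range grid.headI.length).all (fun j =>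
          decide (grid.headI.length ≤ j + p) || pvCell grid i j == pvCell grid i (j + p))))).head? =
      (([2, 3, 4] : List Nat).find? (fun p => grid.headI.length % p == 0 &&
        (List.range grid.length).all (fun i => (List.range grid.headI.length).all (fun j =>
          pvCell grid i j == pvCell grid i (j % p))))) := by
    rw [List.filter_filter, List.head?_filter]
    apply find?_congr'
    intro p hpmem
    have hp : 0 < p := by
      simp only [List.mem_cons, List.not_mem_nil, or_false] at hpmem
      rcases hpmem with rfl | rfl | rfl <;> norm_num
    rw [← hor_bool grid p hp, Bool.and_comm]
  have e2 : ((([2, 3, 4] : List Nat).filter (fun p => grid.length % p == 0)).filter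
        (fun p => (List.range grid.length).all (fun i => (List.range grid.headI.length).all (fun j =>
          decide (grid.length ≤ i + p) || pvCell grid i j == pvCell grid (i + p) j)))).head? =
      (([2, 3, 4] : List Nat).find? (fun p => grid.length % p == 0 &&
        (List.range grid.length).all (fun i => (List.range grid.headI.length).all (fun j =>
          pvCell grid i j == pvCell grid (i % p) j)))) := by
    rw [List.filter_filter, List.head?_filter]
    apply find?_congr'
    intro p hpmem
    have hp : 0 < p := by
      simp only [List.mem_cons, List.not_mem_nil, or_false] at hpmem
      rcases hpmem with rfl | rfl | rfl <;> norm_num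
    rw [← ver_bool grid p hp, Bool.and_comm]
  by_cases hg : (([2, 3, 4] : List Nat).filter (fun p => grid.headI.length % p == 0)) ≠ [] ∨
      (([2, 3, 4] : List Nat).filter (fun p => grid.length % p == 0)) ≠ [] ∨
      (grid.length == grid.headI.length) = true
  · rw [if_pos hg, outer_fold, e1, e2]
    by_cases hsq : grid.length = grid.headI.length
    · rw [if_pos hsq]
      have : (grid.length == grid.headI.length) = true := by simpa using hsq
      rw [this, Bool.true_and, Bool.true_and]
    · rw [if_neg hsq]
      have : (grid.length == grid.headI.length) = false := by simpa using hsq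
      rw [this, Bool.false_and, Bool.false_and]
      simp
  · rw [if_neg hg]
    push Not at hg
    obtain ⟨hH, hV, hB⟩ := hg
    have hsq : ¬ grid.length = grid.headI.length := by simpa using hB
    have hBf : (grid.length == grid.headI.length) = false := by simpa using hB
    have hHn : ∀ p ∈ ([2, 3, 4] : List Nat), ¬ (grid.headI.length % p == 0) = true := by
      rw [← List.filter_eq_nil_iff]; exact hH
    have hVn : ∀ p ∈ ([2, 3, 4] : List Nat), ¬ (grid.length % p == 0) = true := by
      rw [← List.filter_eq_nil_iff]; exact hV
    rw [if_neg hsq, hH, hV, hBf]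
    have f1 : (([2, 3, 4] : List Nat).find? (fun p => grid.headI.length % p == 0 &&
        (List.range grid.length).all (fun i => (List.range grid.headI.length).all (fun j =>
          pvCell grid i j == pvCell grid i (j % p))))) = none := by
      rw [List.find?_eq_none]
      intro p hpm
      simp [hHn p hpm]
    have f2 : (([2, 3, 4] : List Nat).find? (fun p => grid.length % p == 0 &&
        (List.range grid.length).all (fun i => (List.range grid.headI.length).all (fun j =>
          pvCell grid i j == pvCell grid (i % p) j)))) = none := by
      rw [List.find?_eq_none]
      intro p hpm
      simp [hVn p hpm]
    rw [f1, f2]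
    simp

-- ===== VERDICT (by name: the statement is the Claim_ definition above) =====
theorem detect_grid_patterns_py_spec : Claim_equal_detect_grid_patterns_py := by
  intro grid _ _
  unfold Spec_detect_grid_patterns_py
  exact ports_eq grid
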